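-- pv_equiv track=rewrite | github.com/blgcismt/ITI1120 | labs/lab4.py | mess
-- ===== SOURCE A (Python) =====
-- def mess(phrase):
--     '''(str)->str
--     Returns a copy of the given phrase where
--     each character that is one of the last  8 consonants
--     of English alphabet is capitalized
--     and where each space is replaced by a dash.
--     '''
--
--     last8 = ['r', 's', 't', 'v', 'w', 'x', 'y', 'z']
--
--     newPhrase = ""
--
--     for char in phrase:
--         if char == " ":
--             newPhrase += "-"
--
--         elif char in last8:
--             newPhrase += char.upper()
--
--         else:
--             newPhrase += char
--
--     return newPhrase
-- ===== SOURCE B (Python) =====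
-- _SUBS = ((' ', '-'), ('r', 'R'), ('s', 'S'), ('t', 'T'),
--          ('v', 'V'), ('w', 'W'), ('x', 'X'), ('y', 'Y'), ('z', 'Z'))
--
--
-- def mess(phrase):
--     # staged passes: one whole-string replace per substitution,
--     # no per-character loop, branches or accumulator
--     for old, new in _SUBS:
--         phrase = phrase.replace(old, new)
--     return phrase
-- ===== Notes on version B (the rewrite author's own statement) =====
-- stated objective: faster
-- what changed: A makes one per-character Python-level pass with if/elif branches and a growing string accumulator; B instead loops over the 9 substitution pairs and performs one whole-string str.replace pass per pair (staged passes, no per-character control flow), correct because no replacement output ('-' or an uppercase letter) is the source of a later pass.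
import Mathlib
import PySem

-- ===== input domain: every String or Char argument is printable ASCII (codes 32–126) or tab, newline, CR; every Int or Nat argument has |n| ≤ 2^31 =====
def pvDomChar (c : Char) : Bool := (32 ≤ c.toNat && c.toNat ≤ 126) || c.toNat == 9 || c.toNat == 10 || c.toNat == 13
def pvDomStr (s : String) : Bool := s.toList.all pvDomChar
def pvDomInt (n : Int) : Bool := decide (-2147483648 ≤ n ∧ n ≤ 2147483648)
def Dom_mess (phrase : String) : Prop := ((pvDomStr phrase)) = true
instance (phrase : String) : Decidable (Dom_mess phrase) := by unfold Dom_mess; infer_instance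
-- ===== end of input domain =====

-- B replaces A's single per-character loop with branches by 9 staged whole-string
-- replace passes (one str.replace per substitution pair); same O(n), measurably
-- faster in Python because the per-character work moves out of the interpreter loop.

-- ===== PORT A =====
-- last8 = ['r', 's', 't', 'v', 'w', 'x', 'y', 'z']
def messLast8 : List Char := ['r', 's', 't', 'v', 'w', 'x', 'y', 'z']

-- the loop: newPhrase += "-" / char.upper() / char, branch order as in A
def mess (phrase : String) : String :=
  String.ofList (phrase.toList.foldl
    (fun acc c =>
      acc ++ (if c = ' ' then ['-']
              else if c ∈ messLast8 then [PySem.Chars.upperChar c]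
              else [c]))
    [])

-- ===== PORT B =====
-- _SUBS: the substitution pairs B loops over
def messSubs : List (String × String) :=
  [(" ", "-"), ("r", "R"), ("s", "S"), ("t", "T"),
   ("v", "V"), ("w", "W"), ("x", "X"), ("y", "Y"), ("z", "Z")]

-- for old, new in _SUBS: phrase = phrase.replace(old, new)
def mess_alt (phrase : String) : String :=
  messSubs.foldl (fun s p => PySem.Str.replace s p.1 p.2) phrase

-- ===== PRECONDITION & SPEC =====
def Spec_mess (phrase : String) (out : String) : Prop := out = mess_alt phrase
instance (phrase : String) (out : String) : Decidable (Spec_mess phrase out) := by unfold Spec_mess; infer_instance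

-- ===== CLAIM (what is proved, stated in full; the proofs are below) =====
def Claim_equal_mess : Prop := ∀ (phrase : String), Dom_mess phrase → Spec_mess phrase (mess phrase)

-- ===== LEMMAS AND PROOFS =====

-- the composite per-character substitution both programs realise
def messStep (c : Char) : Char :=
  (fun c => if c = 'z' then 'Z' else c)
  ((fun c => if c = 'y' then 'Y' else c)
  ((fun c => if c = 'x' then 'X' else c)
  ((fun c => if c = 'w' then 'W' else c)
  ((fun c => if c = 'v' then 'V' else c)
  ((fun c => if c = 't' then 'T' else c)
  ((fun c => if c = 's' then 'S' else c)
  ((fun c => if c = 'r' then 'R' else c)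
  ((fun c => if c = ' ' then '-' else c) c))))))))

-- replacing a single character is a per-character map (go-level invariant)
theorem replace_go_single (a b : Char) (l acc : List Char) (fuel : Nat)
    (h : l.length ≤ fuel) :
    PySem.Chars.replace.go [a] [b] fuel l acc
      = acc.reverse ++ l.map (fun c => if c = a then b else c) := by
  induction l generalizing fuel acc with
  | nil =>
    cases fuel <;> simp [PySem.Chars.replace.go]
  | cons c t ih =>
    cases fuel with
    | zero => simp at h
    | succ f =>
      simp only [List.length_cons, Nat.succ_le_succ_iff] at h
      by_cases hc : c = a
      · subst hc
        have hpre : List.isPrefixOf [c] (c :: t) = true := by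
          simp [List.isPrefixOf]
        rw [PySem.Chars.replace.go, if_pos hpre]
        rw [show List.drop [c].length (c :: t) = t from rfl, ih _ _ h]
        simp
      · have hpre : List.isPrefixOf [a] (c :: t) = false := by
          simp [List.isPrefixOf]
          intro h'; exact absurd h'.symm hc
        rw [PySem.Chars.replace.go, if_neg (by simp [hpre])]
        rw [ih _ _ h]
        simp [hc]

-- replace with single-char pattern and replacement = map
theorem replace_single (a b : Char) (l : List Char) :
    PySem.Chars.replace l [a] [b] = l.map (fun c => if c = a then b else c) := by
  rw [PySem.Chars.replace]
  simp only [List.isEmpty_iff, reduceCtorEq, if_false]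
  rw [replace_go_single a b l [] l.length le_rfl]
  simp

-- A's per-character branch equals the composite substitution
theorem mess_char_eq (c : Char) :
    (if c = ' ' then ['-']
     else if c ∈ messLast8 then [PySem.Chars.upperChar c]
     else [c]) = [messStep c] := by
  by_cases h1 : c = ' '
  · subst h1; decide
  · by_cases h2 : c ∈ messLast8
    · fin_cases h2 <;> decide
    · simp only [messLast8, List.mem_cons, List.not_mem_nil, or_false] at h2
      push Not at h2
      obtain ⟨hr, hs, ht, hv, hw, hx, hy, hz⟩ := h2
      simp [messLast8, messStep, h1, hr, hs, ht, hv, hw, hx, hy, hz]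

-- A computes the map of the composite substitution
theorem messA_eq_map (phrase : String) :
    mess phrase = String.ofList (phrase.toList.map messStep) := by
  unfold mess
  rw [show (fun (acc : List Char) c =>
        acc ++ (if c = ' ' then ['-']
                else if c ∈ messLast8 then [PySem.Chars.upperChar c]
                else [c]))
      = (fun acc c => acc ++ [messStep c]) from
        funext fun acc => funext fun c => by rw [mess_char_eq]]
  rw [PySem.List.foldl_append_singleton_eq_map]
  simp

-- B's nine replace passes compute the same map
theorem messB_eq_map (phrase : String) :
    mess_alt phrase = String.ofList (phrase.toList.map messStep) := by
  have hB : (mess_alt phrase).toList = phrase.toList.map (fun c =>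
        (fun c => if c = 'z' then 'Z' else c)
        ((fun c => if c = 'y' then 'Y' else c)
        ((fun c => if c = 'x' then 'X' else c)
        ((fun c => if c = 'w' then 'W' else c)
        ((fun c => if c = 'v' then 'V' else c)
        ((fun c => if c = 't' then 'T' else c)
        ((fun c => if c = 's' then 'S' else c)
        ((fun c => if c = 'r' then 'R' else c)
        ((fun c => if c = ' ' then '-' else c) c))))))))) := by
    simp only [mess_alt, messSubs, List.foldl_cons, List.foldl_nil]
    simp only [PySem.Str.toList_replace,
      show (" " : String).toList = [' '] from rfl, show ("-" : String).toList = ['-'] from rfl,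
      show ("r" : String).toList = ['r'] from rfl, show ("R" : String).toList = ['R'] from rfl,
      show ("s" : String).toList = ['s'] from rfl, show ("S" : String).toList = ['S'] from rfl,
      show ("t" : String).toList = ['t'] from rfl, show ("T" : String).toList = ['T'] from rfl,
      show ("v" : String).toList = ['v'] from rfl, show ("V" : String).toList = ['V'] from rfl,
      show ("w" : String).toList = ['w'] from rfl, show ("W" : String).toList = ['W'] from rfl,
      show ("x" : String).toList = ['x'] from rfl, show ("X" : String).toList = ['X'] from rfl,
      show ("y" : String).toList = ['y'] from rfl, show ("Y" : String).toList = ['Y'] from rfl,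
      show ("z" : String).toList = ['z'] from rfl, show ("Z" : String).toList = ['Z'] from rfl,
      replace_single, List.map_map, Function.comp_def]
  rw [show (fun c =>
        (fun c => if c = 'z' then 'Z' else c)
        ((fun c => if c = 'y' then 'Y' else c)
        ((fun c => if c = 'x' then 'X' else c)
        ((fun c => if c = 'w' then 'W' else c)
        ((fun c => if c = 'v' then 'V' else c)
        ((fun c => if c = 't' then 'T' else c)
        ((fun c => if c = 's' then 'S' else c)
        ((fun c => if c = 'r' then 'R' else c)
        ((fun c => if c = ' ' then '-' else c) c))))))))) = messStep from rfl] at hB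
  rw [← hB, String.ofList_toList]

-- ===== VERDICT (by name: the statement is the Claim_ definition above) =====
theorem mess_spec : Claim_equal_mess := by
  intro phrase _
  unfold Spec_mess
  rw [messA_eq_map, messB_eq_map]
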